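-- pv_equiv track=rewrite | github.com/andysitu/ups_to_fedex | fedex_rates.py | get_zone_dic
-- ===== SOURCE A (Python) =====
-- def get_zone_dic(zone_list, col_letters_list, zone_limit = 8):
-- 	zone_dic = {}
--
-- 	for i, letter in enumerate(col_letters_list):
-- 		if letter == 'A':
-- 			zone_dic[letter] = 1
-- 		else:
-- 			zone_dic[letter] = zone_list[i-1]
--
-- 			if zone_list[i-1] == zone_limit:
-- 				break
--
-- 	return zone_dic
-- ===== SOURCE B (Python) =====
-- def get_zone_dic(zone_list, col_letters_list, zone_limit=8):
--     # locate the cutoff (index after the first breaking letter), then build in one comprehension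
--     cut = next((i + 1 for i, letter in enumerate(col_letters_list)
--                 if letter != 'A' and zone_list[i - 1] == zone_limit),
--                len(col_letters_list))
--     return {letter: 1 if letter == 'A' else zone_list[i - 1]
--             for i, letter in enumerate(col_letters_list[:cut])}
-- ===== Notes on version B (the rewrite author's own statement) =====
-- stated objective: alternative
-- what changed: A's single fused loop that builds the dict and breaks mid-iteration is replaced by two separate passes: first locate the cutoff index with next() over a generator, then build the whole dict in one comprehension over the prefix slice.
import Mathlib
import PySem

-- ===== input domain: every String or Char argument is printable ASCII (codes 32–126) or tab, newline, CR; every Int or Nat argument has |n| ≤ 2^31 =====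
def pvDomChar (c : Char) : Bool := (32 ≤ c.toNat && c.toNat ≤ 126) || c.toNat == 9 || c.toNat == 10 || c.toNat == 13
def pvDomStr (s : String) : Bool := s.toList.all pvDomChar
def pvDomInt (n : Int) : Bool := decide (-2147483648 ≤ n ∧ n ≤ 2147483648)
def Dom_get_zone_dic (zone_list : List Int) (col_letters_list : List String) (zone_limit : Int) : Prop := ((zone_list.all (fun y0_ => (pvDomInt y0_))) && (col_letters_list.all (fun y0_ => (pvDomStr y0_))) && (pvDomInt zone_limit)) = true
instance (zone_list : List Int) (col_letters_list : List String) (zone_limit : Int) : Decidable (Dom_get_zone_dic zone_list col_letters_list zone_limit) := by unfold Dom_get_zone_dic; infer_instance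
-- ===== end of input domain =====

-- B replaces A's fused build-and-break loop by a locate-then-build pair of passes (objective: alternative decomposition, same cost).

-- ===== PORT A =====
-- loop of A: insert 1 for 'A', else insert zone_list[i-1] and break when it equals zone_limit.
-- pyGet? is none exactly where Python raises IndexError; those inputs are outside Pre_ (getD 0 is a total stand-in there).
def pvGoA (zl : List Int) (lim : Int) : List (Int × String) → PySem.Dict String Int → PySem.Dict String Int
  | [], d => d
  | (i, letter) :: rest, d =>
    if letter = "A" then pvGoA zl lim rest (d.insert letter 1)
    else
      let v := (PySem.List.pyGet? zl (i - 1)).getD 0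
      let d' := d.insert letter v
      if v = lim then d' else pvGoA zl lim rest d'

def get_zone_dic (zone_list : List Int) (col_letters_list : List String) (zone_limit : Int) : List (String × Int) :=
  (pvGoA zone_list zone_limit (PySem.List.enumerate col_letters_list 0) PySem.Dict.empty).items

-- ===== PORT B =====
-- next((i+1 for i, letter in enumerate(...) if letter != 'A' and zone_list[i-1] == zone_limit), len(...))
def pvCutB (zl : List Int) (lim : Int) (dflt : Int) : List (Int × String) → Int
  | [] => dflt
  | (i, letter) :: rest =>
    if letter ≠ "A" ∧ (PySem.List.pyGet? zl (i - 1)).getD 0 = lim then i + 1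
    else pvCutB zl lim dflt rest

-- {letter: 1 if letter == 'A' else zone_list[i-1] for i, letter in enumerate(prefix)}
def pvBuildB (zl : List Int) : List (Int × String) → PySem.Dict String Int → PySem.Dict String Int
  | [], d => d
  | (i, letter) :: rest, d =>
    pvBuildB zl rest (d.insert letter (if letter = "A" then 1 else (PySem.List.pyGet? zl (i - 1)).getD 0))

def get_zone_dic_alt (zone_list : List Int) (col_letters_list : List String) (zone_limit : Int) : List (String × Int) :=
  (pvBuildB zone_list
    (PySem.List.enumerate
      (PySem.List.slice col_letters_list none
        (some (pvCutB zone_list zone_limit (col_letters_list.length : Int)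
                 (PySem.List.enumerate col_letters_list 0)))) 0)
    PySem.Dict.empty).items

-- ===== PRECONDITION & SPEC =====
-- Pre_ excludes exactly the inputs where A raises IndexError: a non-'A' letter at position i with
-- zone_list[i-1] out of range that is reached before any earlier breaking position.
def Pre_get_zone_dic (zone_list : List Int) (col_letters_list : List String) (zone_limit : Int) : Prop :=
  ∀ i ∈ List.range col_letters_list.length,
    col_letters_list[i]! ≠ "A" → (zone_list = [] ∨ zone_list.length < i) →
      ∃ j ∈ List.range i, col_letters_list[j]! ≠ "A" ∧
        PySem.List.pyGet? zone_list ((j : Int) - 1) = some zone_limit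
instance (zone_list : List Int) (col_letters_list : List String) (zone_limit : Int) : Decidable (Pre_get_zone_dic zone_list col_letters_list zone_limit) := by unfold Pre_get_zone_dic; infer_instance

def pvWitness_get_zone_dic : List Int × List String × Int := ([1, 2, 8], ["A", "B", "C"], 8)

def Spec_get_zone_dic (zone_list : List Int) (col_letters_list : List String) (zone_limit : Int) (out : List (String × Int)) : Prop := out = get_zone_dic_alt zone_list col_letters_list zone_limit
instance (zone_list : List Int) (col_letters_list : List String) (zone_limit : Int) (out : List (String × Int)) : Decidable (Spec_get_zone_dic zone_list col_letters_list zone_limit out) := by unfold Spec_get_zone_dic; infer_instance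

-- ===== CLAIM (what is proved, stated in full; the proofs are below) =====
def Claim_equal_get_zone_dic : Prop := ∀ (zone_list : List Int) (col_letters_list : List String) (zone_limit : Int), Dom_get_zone_dic zone_list col_letters_list zone_limit → Pre_get_zone_dic zone_list col_letters_list zone_limit → Spec_get_zone_dic zone_list col_letters_list zone_limit (get_zone_dic zone_list col_letters_list zone_limit)

-- ===== LEMMAS AND PROOFS =====

-- the part of the enumerated list that A actually processes: everything up to and including the first breaking pair
def pvTwb (zl : List Int) (lim : Int) : List (Int × String) → List (Int × String)
  | [] => []
  | (i, letter) :: rest =>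
    if letter ≠ "A" ∧ (PySem.List.pyGet? zl (i - 1)).getD 0 = lim then [(i, letter)]
    else (i, letter) :: pvTwb zl lim rest

theorem pvGoA_eq_buildB_twb (zl : List Int) (lim : Int) :
    ∀ (es : List (Int × String)) (d : PySem.Dict String Int),
      pvGoA zl lim es d = pvBuildB zl (pvTwb zl lim es) d := by
  intro es
  induction es with
  | nil => intro d; rfl
  | cons p rest ih =>
    intro d
    obtain ⟨i, letter⟩ := p
    by_cases hA : letter = "A"
    · simp [pvGoA, pvTwb, pvBuildB, hA, ih]
    · by_cases hv : (PySem.List.pyGet? zl (i - 1)).getD 0 = lim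
      · simp [pvGoA, pvTwb, pvBuildB, hA, hv]
      · simp [pvGoA, pvTwb, pvBuildB, hA, hv, ih]

theorem pvCutB_ge (zl : List Int) (lim : Int) :
    ∀ (cl : List String) (s : Int),
      s ≤ pvCutB zl lim (s + (cl.length : Int)) (PySem.List.enumerate cl s) := by
  intro cl
  induction cl with
  | nil => intro s; simp [PySem.List.enumerate, pvCutB]
  | cons x rest ih =>
    intro s
    rw [PySem.List.enumerate_cons]
    simp only [pvCutB]
    split
    · omega
    · have := ih (s + 1)
      have harith : s + (((x :: rest).length : Nat) : Int) = (s + 1) + (rest.length : Int) := by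
        simp
        ring
      rw [harith]
      omega

theorem pvTake_cutB_eq_twb (zl : List Int) (lim : Int) :
    ∀ (cl : List String) (s : Int),
      List.take (pvCutB zl lim (s + (cl.length : Int)) (PySem.List.enumerate cl s) - s).toNat
        (PySem.List.enumerate cl s) = pvTwb zl lim (PySem.List.enumerate cl s) := by
  intro cl
  induction cl with
  | nil => intro s; simp [PySem.List.enumerate, pvCutB, pvTwb]
  | cons x rest ih =>
    intro s
    rw [PySem.List.enumerate_cons]
    by_cases h : x ≠ "A" ∧ (PySem.List.pyGet? zl (s - 1)).getD 0 = lim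
    · simp [pvCutB, pvTwb, h]
    · have harith : s + ((x :: rest).length : Int) = (s + 1) + (rest.length : Int) := by
        simp [List.length_cons]; ring
      have hge : s + 1 ≤ pvCutB zl lim ((s + 1) + (rest.length : Int)) (PySem.List.enumerate rest (s + 1)) :=
        pvCutB_ge zl lim rest (s + 1)
      have ihs := ih (s + 1)
      simp only [pvCutB, pvTwb, if_neg h, harith]
      set c := pvCutB zl lim ((s + 1) + (rest.length : Int)) (PySem.List.enumerate rest (s + 1)) with hc
      have htn : (c - s).toNat = (c - (s + 1)).toNat + 1 := by omega
      rw [htn, List.take_succ_cons, ihs]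

theorem pvEnumerate_take : ∀ (cl : List String) (n : Nat) (s : Int),
    PySem.List.enumerate (cl.take n) s = List.take n (PySem.List.enumerate cl s) := by
  intro cl
  induction cl with
  | nil => intro n s; simp [PySem.List.enumerate]
  | cons x rest ih =>
    intro n s
    cases n with
    | zero => simp [PySem.List.enumerate]
    | succ m => simp [PySem.List.enumerate_cons, List.take_succ_cons, ih]

theorem get_zone_dic_eq_alt (zone_list : List Int) (col_letters_list : List String) (zone_limit : Int) :
    get_zone_dic zone_list col_letters_list zone_limit = get_zone_dic_alt zone_list col_letters_list zone_limit := by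
  unfold get_zone_dic get_zone_dic_alt
  have h0 : (0 : Int) ≤ pvCutB zone_list zone_limit ((col_letters_list.length : Int)) (PySem.List.enumerate col_letters_list 0) := by
    have := pvCutB_ge zone_list zone_limit col_letters_list 0
    simpa using this
  rw [PySem.List.slice_to _ h0]
  rw [pvEnumerate_take]
  have ht := pvTake_cutB_eq_twb zone_list zone_limit col_letters_list 0
  simp only [zero_add, Int.sub_zero] at ht
  rw [ht]
  rw [pvGoA_eq_buildB_twb]

-- ===== VERDICT (by name: the statement is the Claim_ definition above) =====
theorem get_zone_dic_spec : Claim_equal_get_zone_dic := by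
  intro zone_list col_letters_list zone_limit _ _
  unfold Spec_get_zone_dic
  exact get_zone_dic_eq_alt zone_list col_letters_list zone_limit
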